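-- pv_equiv track=rewrite | github.com/Vinanddrinks/prjtpython | read/playpartition.py | transposition_partition
-- ===== SOURCE A (Python) =====
-- def transposition_note(note, transposition_value):
--     # This function transposes a note it takes as input a string and an integer value and returns a string corresponding
--     # to the transposed value of the note
--     # We will get the transposition note by looking at the index of the note and then adding the transposition value
--     # while keeping it all modulo len(transposition_list) to avoid indexing errors
--     transposition_list = ["DO", "RE", "MI", "FA", "SOL", "LA", "SI"]
--     transposed_index = (transposition_list.index(note) + transposition_value) % (len(transposition_list))
--     return transposition_list[transposed_index]
--
-- def partition_to_list(partition):
--     # This function transforms a string partition in a list with notes and their shapes separated in different list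
--     # values it takes as input a string
--     new_partition = ""
--     for character in partition:
--         if ascii("A") <= ascii(character) <= ascii('Z'):
--             new_partition = new_partition + character
--         if ascii('a') <= ascii(character) <= ascii("z"):
--             new_partition = new_partition + " "
--             new_partition = new_partition + character
--         if character == ' ':
--             new_partition = new_partition + character
--     partition_list = new_partition.split()
--     return partition_list
--
-- def transposition_partition(partition, transposition_value):
--     # This function transforms the partition in a transposed version of it ready to be played it takes as input a string
--     # and an integer value (corresponding to the transposition value)
--     partition = partition_to_list(partition)
--     transposed_partition = []
--     for note in partition:
--         if ascii("A") <= ascii(note) <=ascii("Y"):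
--             transposed_partition.append(transposition_note(note, transposition_value))
--         else:
--             transposed_partition.append(note)
--     return transposed_partition
-- ===== SOURCE B (Python) =====
-- def transposition_partition(partition, transposition_value):
--     # One pass over the characters with a token buffer; no intermediate spaced
--     # string and no .split().  Tokens are flushed (and transposed when they are
--     # note names) as they are completed.
--     notes = ["DO", "RE", "MI", "FA", "SOL", "LA", "SI"]
--     out = []
--     buf = ""
--
--     def flush():
--         nonlocal buf
--         if buf:
--             if "A" <= buf <= "Y":
--                 out.append(notes[(notes.index(buf) + transposition_value) % 7])
--             else:
--                 out.append(buf)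
--             buf = ""
--
--     for ch in partition:
--         if "A" <= ch <= "Z":
--             buf += ch
--         elif "a" <= ch <= "z":
--             flush()
--             buf = ch
--         elif ch == " ":
--             flush()
--     flush()
--     return out
-- ===== Notes on version B (the rewrite author's own statement) =====
-- stated objective: simpler
-- what changed: B tokenizes and transposes in a single pass with a token buffer, instead of building an intermediate spaced string, calling .split(), and then looping again over the token list with ascii()-repr comparisons.
import Mathlib
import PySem

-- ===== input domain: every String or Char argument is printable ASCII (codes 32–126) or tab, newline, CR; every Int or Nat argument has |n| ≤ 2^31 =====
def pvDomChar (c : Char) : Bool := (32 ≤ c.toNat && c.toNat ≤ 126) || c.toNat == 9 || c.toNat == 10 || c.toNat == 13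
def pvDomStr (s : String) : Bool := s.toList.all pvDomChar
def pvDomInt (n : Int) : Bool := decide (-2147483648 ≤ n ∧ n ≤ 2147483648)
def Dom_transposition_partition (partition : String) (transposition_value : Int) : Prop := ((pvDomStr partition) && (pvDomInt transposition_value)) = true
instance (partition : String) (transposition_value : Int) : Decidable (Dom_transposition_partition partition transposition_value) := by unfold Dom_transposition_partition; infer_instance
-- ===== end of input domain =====

-- B replaces A's build-spaced-string + .split() + second loop by a single pass with a token
-- buffer (a different decomposition, same O(n) cost); A = B on every input where A returns
-- (both Pythons raise ValueError on the same inputs, excluded by Pre_).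


-- ===== PORT A =====
-- ascii() hand-ported (repr with quote choice and escapes): exact for strings of printable
-- ASCII characters plus tab/newline/CR, which is all this file claims anything about.
-- Comparison of ascii() results is Python's str <=, i.e. Lean's <= on List Char.
def pyAsciiEsc (q c : Char) : List Char :=
  if c = '\\' then ['\\', '\\']
  else if c = '\t' then ['\\', 't']
  else if c = '\n' then ['\\', 'n']
  else if c = '\r' then ['\\', 'r']
  else if c = '\'' ∧ q = '\'' then ['\\', '\'']
  else [c]

def pyAscii (s : List Char) : List Char :=
  let q : Char := if s.contains '\'' && !(s.contains '"') then '"' else '\''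
  q :: (s.flatMap (pyAsciiEsc q) ++ [q])

-- transposition_note: list.index raises ValueError when note is not in the list; the port
-- returns "" there (exactly those inputs are excluded by Pre_transposition_partition).
def transposition_note (note : String) (transposition_value : Int) : String :=
  let transposition_list : List String := ["DO", "RE", "MI", "FA", "SOL", "LA", "SI"]
  match PySem.List.index? transposition_list note with
  | some i => (PySem.List.pyGet? transposition_list
      (PySem.Int.mod ((i : Int) + transposition_value) 7)).getD ""
  | none => ""

def partition_to_list (partition : String) : List String :=
  (PySem.Chars.split₀ (partition.toList.foldl (fun np character =>
    let np := if pyAscii ['A'] ≤ pyAscii [character] ∧ pyAscii [character] ≤ pyAscii ['Z']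
      then np ++ [character] else np
    let np := if pyAscii ['a'] ≤ pyAscii [character] ∧ pyAscii [character] ≤ pyAscii ['z']
      then (np ++ [' ']) ++ [character] else np
    if character = ' ' then np ++ [character] else np) [])).map String.ofList

def transposition_partition (partition : String) (transposition_value : Int) : List String :=
  (partition_to_list partition).foldl (fun transposed note =>
    if pyAscii ['A'] ≤ pyAscii note.toList ∧ pyAscii note.toList ≤ pyAscii ['Y']
    then transposed ++ [transposition_note note transposition_value]
    else transposed ++ [note]) []

-- ===== PORT B =====
-- flush(): transpose-or-keep a completed token (list.index's ValueError → "" exactly as on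
-- the A side; those inputs are excluded by Pre_transposition_partition).
def tpFlushTok (transposition_value : Int) (tok : List Char) : String :=
  if ['A'] ≤ tok ∧ tok ≤ ['Y'] then
    let notes : List String := ["DO", "RE", "MI", "FA", "SOL", "LA", "SI"]
    match PySem.List.index? notes (String.ofList tok) with
    | some i => (PySem.List.pyGet? notes
        (PySem.Int.mod ((i : Int) + transposition_value) 7)).getD ""
    | none => ""
  else String.ofList tok

def tpFlush (transposition_value : Int) (st : List String × List Char) :
    List String × List Char :=
  if st.2 = [] then st else (st.1 ++ [tpFlushTok transposition_value st.2], [])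

def transposition_partition_alt (partition : String) (transposition_value : Int) : List String :=
  (tpFlush transposition_value (partition.toList.foldl (fun (st : List String × List Char) ch =>
    if 'A' ≤ ch ∧ ch ≤ 'Z' then (st.1, st.2 ++ [ch])
    else if 'a' ≤ ch ∧ ch ≤ 'z' then ((tpFlush transposition_value st).1, [ch])
    else if ch = ' ' then tpFlush transposition_value st
    else st) ([], []))).1

-- ===== PRECONDITION & SPEC =====
-- character classes and the token list of a partition (used only to state Pre_)
def pvCls (c : Char) : List Char :=
  if 'A' ≤ c ∧ c ≤ 'Z' then [c]
  else if 'a' ≤ c ∧ c ≤ 'z' then [' ', c]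
  else if c = ' ' then [c] else []

def pvToks (s : String) : List (List Char) :=
  PySem.Chars.split₀ (s.toList.flatMap pvCls)

-- Pre_ excludes exactly the inputs on which the Python A raises ValueError (list.index on a
-- token that the range test selects for transposition but which is not one of the seven
-- note names); B raises the same ValueError there.
def Pre_transposition_partition (partition : String) (transposition_value : Int) : Prop :=
  ∀ t ∈ pvToks partition, (['A'] ≤ t ∧ t ≤ ['Y']) →
    String.ofList t ∈ (["DO", "RE", "MI", "FA", "SOL", "LA", "SI"] : List String)
instance (partition : String) (transposition_value : Int) :
    Decidable (Pre_transposition_partition partition transposition_value) := by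
  unfold Pre_transposition_partition; infer_instance

def pvWitness_transposition_partition : String × Int := ("DO cRE fMI SOL do", 3)

def Spec_transposition_partition (partition : String) (transposition_value : Int) (out : List String) : Prop := out = transposition_partition_alt partition transposition_value
instance (partition : String) (transposition_value : Int) (out : List String) : Decidable (Spec_transposition_partition partition transposition_value out) := by unfold Spec_transposition_partition; infer_instance

-- ===== CLAIM (what is proved, stated in full; the proofs are below) =====
def Claim_equal_transposition_partition : Prop := ∀ (partition : String) (transposition_value : Int), Dom_transposition_partition partition transposition_value → Pre_transposition_partition partition transposition_value → Spec_transposition_partition partition transposition_value (transposition_partition partition transposition_value)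

-- ===== LEMMAS AND PROOFS =====
-- (the ports agree on ALL of Dom; the Pre_ hypothesis only reflects that the two Pythons
-- raise ValueError outside it — both ports return "" for such a token)

-- small kit for the lexicographic order on List Char
theorem chListLe (l m : List Char) : l ≤ m ↔ (l = m ∨ List.Lex (· < ·) l m) := Iff.rfl

theorem chNilLe (l : List Char) : ([] : List Char) ≤ l := by
  rw [chListLe]
  cases l with
  | nil => exact Or.inl rfl
  | cons a l => exact Or.inr List.Lex.nil

theorem chLeNil (l : List Char) : l ≤ ([] : List Char) ↔ l = [] := by
  rw [chListLe]
  constructor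
  · rintro (h | h)
    · exact h
    · exact absurd h (by cases l <;> rintro ⟨⟩)
  · exact Or.inl

theorem chConsLe (a b : Char) (l m : List Char) :
    (a :: l ≤ b :: m) ↔ (a < b ∨ (a = b ∧ l ≤ m)) := by
  rw [chListLe, chListLe]
  constructor
  · rintro (h | h)
    · injection h with h1 h2
      subst h1; subst h2
      exact Or.inr ⟨rfl, Or.inl rfl⟩
    · cases h with
      | cons h => exact Or.inr ⟨rfl, Or.inr h⟩
      | rel h => exact Or.inl h
  · rintro (h | ⟨rfl, (rfl | h)⟩)
    · exact Or.inr (List.Lex.rel h)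
    · exact Or.inl rfl
    · exact Or.inr (List.Lex.cons h)

-- reference tokenizer: current buffer + remaining characters ↦ list of tokens
def tokT (buf : List Char) : List Char → List (List Char)
  | [] => if buf = [] then [] else [buf]
  | c :: r =>
    if 'A' ≤ c ∧ c ≤ 'Z' then tokT (buf ++ [c]) r
    else if 'a' ≤ c ∧ c ≤ 'z' then (if buf = [] then tokT [c] r else buf :: tokT [c] r)
    else if c = ' ' then (if buf = [] then tokT [] r else buf :: tokT [] r)
    else tokT buf r

def pvLetter (c : Char) : Prop := ('A' ≤ c ∧ c ≤ 'Z') ∨ ('a' ≤ c ∧ c ≤ 'z')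

def pvLetters (t : List Char) : Prop := ∀ c ∈ t, pvLetter c

theorem tokT_letters (chars : List Char) : ∀ buf, pvLetters buf →
    ∀ t ∈ tokT buf chars, t ≠ [] ∧ pvLetters t := by
  induction chars with
  | nil =>
    intro buf hbuf t ht
    by_cases h : buf = [] <;> simp [tokT, h] at ht
    subst ht; exact ⟨h, hbuf⟩
  | cons c r ih =>
    intro buf hbuf t ht
    by_cases hU : 'A' ≤ c ∧ c ≤ 'Z'
    · simp only [tokT, if_pos hU] at ht
      refine ih (buf ++ [c]) ?_ t ht
      intro x hx
      rcases List.mem_append.1 hx with h | h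
      · exact hbuf x h
      · simp at h; subst h; exact Or.inl hU
    · by_cases hL : 'a' ≤ c ∧ c ≤ 'z'
      · simp only [tokT, if_neg hU, if_pos hL] at ht
        have hc : pvLetters [c] := by intro x hx; simp at hx; subst hx; exact Or.inr hL
        by_cases hb : buf = []
        · rw [if_pos hb] at ht; exact ih [c] hc t ht
        · rw [if_neg hb] at ht
          rcases List.mem_cons.1 ht with rfl | ht
          · exact ⟨hb, hbuf⟩
          · exact ih [c] hc t ht
      · by_cases hS : c = ' '
        · simp only [tokT, if_neg hU, if_neg hL, if_pos hS] at ht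
          have he : pvLetters [] := by intro x hx; simp at hx
          by_cases hb : buf = []
          · rw [if_pos hb] at ht; exact ih [] he t ht
          · rw [if_neg hb] at ht
            rcases List.mem_cons.1 ht with rfl | ht
            · exact ⟨hb, hbuf⟩
            · exact ih [] he t ht
        · simp only [tokT, if_neg hU, if_neg hL, if_neg hS] at ht
          exact ih buf hbuf t ht

theorem isspace_of_letter (c : Char) (h : pvLetter c) : PySem.Chars.isspace c = false := by
  have h1 : (65 ≤ c.toNat ∧ c.toNat ≤ 90) ∨ (97 ≤ c.toNat ∧ c.toNat ≤ 122) := by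
    rcases h with ⟨ha, hb⟩ | ⟨ha, hb⟩
    · exact Or.inl ⟨ha, hb⟩
    · exact Or.inr ⟨ha, hb⟩
  simp only [PySem.Chars.isspace]
  simp only [Bool.or_eq_false_iff, Bool.and_eq_false_iff, decide_eq_false_iff_not]
  omega

theorem split₀_go_flatMap (chars : List Char) : ∀ cur acc,
    PySem.Chars.split₀.go (chars.flatMap pvCls) cur acc
      = acc.reverse ++ tokT cur.reverse chars := by
  induction chars with
  | nil =>
    intro cur acc
    simp only [List.flatMap_nil, PySem.Chars.split₀.go, tokT]
    cases cur with
    | nil => simp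
    | cons x xs => simp
  | cons c r ih =>
    intro cur acc
    simp only [List.flatMap_cons]
    by_cases hU : 'A' ≤ c ∧ c ≤ 'Z'
    · have hs : PySem.Chars.isspace c = false := isspace_of_letter c (Or.inl hU)
      simp only [pvCls, if_pos hU, List.cons_append, List.nil_append]
      rw [show PySem.Chars.split₀.go (c :: List.flatMap pvCls r) cur acc
            = PySem.Chars.split₀.go (List.flatMap pvCls r) (c :: cur) acc by
          simp only [PySem.Chars.split₀.go]; simp [hs]]
      rw [ih (c :: cur) acc]
      simp only [tokT, if_pos hU, List.reverse_cons]
    · by_cases hL : 'a' ≤ c ∧ c ≤ 'z'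
      · have hs : PySem.Chars.isspace c = false := isspace_of_letter c (Or.inr hL)
        simp only [pvCls, if_neg hU, if_pos hL, List.cons_append, List.nil_append]
        rw [show PySem.Chars.split₀.go (' ' :: c :: List.flatMap pvCls r) cur acc
              = if cur.isEmpty then PySem.Chars.split₀.go (List.flatMap pvCls r) [c] acc
                else PySem.Chars.split₀.go (List.flatMap pvCls r) [c] (cur.reverse :: acc) by
            simp only [PySem.Chars.split₀.go]
            by_cases hb : cur.isEmpty <;> simp [hb, hs, show PySem.Chars.isspace ' ' = true by decide]]
        by_cases hb : cur = []
        · subst hb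
          simp only [List.isEmpty_nil, ih [c] acc]
          simp [tokT, hU, hL]
        · rw [if_neg (by simpa using hb), ih [c] (cur.reverse :: acc)]
          simp [tokT, hU, hL, show cur.reverse ≠ [] by simpa using hb]
      · by_cases hS : c = ' '
        · subst hS
          rw [show pvCls ' ' = [' '] from by decide, List.singleton_append]
          rw [show PySem.Chars.split₀.go (' ' :: List.flatMap pvCls r) cur acc
                = if cur.isEmpty then PySem.Chars.split₀.go (List.flatMap pvCls r) [] acc
                  else PySem.Chars.split₀.go (List.flatMap pvCls r) [] (cur.reverse :: acc) by
              simp only [PySem.Chars.split₀.go]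
              by_cases hb : cur.isEmpty <;> simp [hb, show PySem.Chars.isspace ' ' = true by decide]]
          by_cases hb : cur = []
          · subst hb
            simp only [List.isEmpty_nil, ih [] acc]
            simp [tokT]
          · rw [if_neg (by simpa using hb), ih [] (cur.reverse :: acc)]
            simp [tokT, hb, show cur.reverse ≠ [] by simpa using hb]
        · simp only [pvCls, if_neg hU, if_neg hL, if_neg hS, List.nil_append]
          rw [ih cur acc]
          simp [tokT, hU, hL, hS]

theorem chPairLe (a b q : Char) : ([a, q] ≤ [b, q]) ↔ a ≤ b := by
  rw [chConsLe]
  constructor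
  · rintro (h | ⟨rfl, -⟩)
    · exact le_of_lt h
    · exact le_refl a
  · intro h
    rcases lt_or_eq_of_le h with h | rfl
    · exact Or.inl h
    · exact Or.inr ⟨rfl, le_refl _⟩

theorem chQuoteWrap (a b : Char) : (['\'', a, '\''] ≤ ['\'', b, '\'']) ↔ a ≤ b := by
  rw [chConsLe]
  constructor
  · rintro (h | ⟨-, h⟩)
    · exact absurd h (lt_irrefl _)
    · exact (chPairLe a b '\'').1 h
  · intro h
    exact Or.inr ⟨rfl, (chPairLe a b '\'').2 h⟩

-- the ascii()-repr comparisons of single characters are the plain range tests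
theorem ascii_up (c : Char) :
    (pyAscii ['A'] ≤ pyAscii [c] ∧ pyAscii [c] ≤ pyAscii ['Z']) ↔ ('A' ≤ c ∧ c ≤ 'Z') := by
  by_cases h1 : c = '\\'
  · subst h1; decide
  by_cases h2 : c = '\t'
  · subst h2; decide
  by_cases h3 : c = '\n'
  · subst h3; decide
  by_cases h4 : c = '\r'
  · subst h4; decide
  by_cases h5 : c = '\''
  · subst h5; decide
  have h5' : ('\'' : Char) ∉ [c] := by simp [Ne.symm h5]
  have hq : pyAscii [c] = ['\'', c, '\''] := by
    simp [pyAscii, h5', pyAsciiEsc, h1, h2, h3, h4, h5]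
  rw [hq, show pyAscii ['A'] = ['\'', 'A', '\''] from by decide,
      show pyAscii ['Z'] = ['\'', 'Z', '\''] from by decide]
  rw [chQuoteWrap, chQuoteWrap]

theorem ascii_low (c : Char) :
    (pyAscii ['a'] ≤ pyAscii [c] ∧ pyAscii [c] ≤ pyAscii ['z']) ↔ ('a' ≤ c ∧ c ≤ 'z') := by
  by_cases h1 : c = '\\'
  · subst h1; decide
  by_cases h2 : c = '\t'
  · subst h2; decide
  by_cases h3 : c = '\n'
  · subst h3; decide
  by_cases h4 : c = '\r'
  · subst h4; decide
  by_cases h5 : c = '\''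
  · subst h5; decide
  have h5' : ('\'' : Char) ∉ [c] := by simp [Ne.symm h5]
  have hq : pyAscii [c] = ['\'', c, '\''] := by
    simp [pyAscii, h5', pyAsciiEsc, h1, h2, h3, h4, h5]
  rw [hq, show pyAscii ['a'] = ['\'', 'a', '\''] from by decide,
      show pyAscii ['z'] = ['\'', 'z', '\''] from by decide]
  rw [chQuoteWrap, chQuoteWrap]

theorem letter_not_special (c : Char) (h : pvLetter c) :
    c ≠ '\\' ∧ c ≠ '\t' ∧ c ≠ '\n' ∧ c ≠ '\r' ∧ c ≠ '\'' := by
  rcases h with ⟨h1, h2⟩ | ⟨h1, h2⟩ <;>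
    refine ⟨?_, ?_, ?_, ?_, ?_⟩ <;> rintro rfl <;>
    first
    | exact absurd h1 (by decide)
    | exact absurd h2 (by decide)

theorem flatMap_esc_letters : ∀ (t : List Char), pvLetters t →
    t.flatMap (pyAsciiEsc '\'') = t
  | [], _ => rfl
  | c :: ts, hl => by
    obtain ⟨e1, e2, e3, e4, e5⟩ := letter_not_special c (hl c List.mem_cons_self)
    rw [List.flatMap_cons,
        show pyAsciiEsc '\'' c = [c] by simp [pyAsciiEsc, e1, e2, e3, e4, e5],
        flatMap_esc_letters ts (fun x hx => hl x (List.mem_cons_of_mem _ hx))]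
    rfl

theorem pyAscii_letters (t : List Char) (hl : pvLetters t) :
    pyAscii t = '\'' :: (t ++ ['\'']) := by
  have hmem : '\'' ∉ t := fun hm => (letter_not_special '\'' (hl _ hm)).2.2.2.2 rfl
  simp [pyAscii, hmem, flatMap_esc_letters t hl]

theorem quote_lt_letter (c : Char) (h : pvLetter c) : '\'' < c := by
  rcases h with ⟨h1, _⟩ | ⟨h1, _⟩ <;> exact lt_of_lt_of_le (by decide) h1

theorem ascii_tok (t : List Char) (hne : t ≠ []) (hl : pvLetters t) :
    (pyAscii ['A'] ≤ pyAscii t ∧ pyAscii t ≤ pyAscii ['Y']) ↔ (['A'] ≤ t ∧ t ≤ ['Y']) := by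
  obtain ⟨c, ts, rfl⟩ : ∃ c ts, t = c :: ts := by
    cases t with
    | nil => exact absurd rfl hne
    | cons c ts => exact ⟨c, ts, rfl⟩
  rw [pyAscii_letters _ hl, show pyAscii ['A'] = ['\'', 'A', '\''] from by decide,
      show pyAscii ['Y'] = ['\'', 'Y', '\''] from by decide]
  have hqle : (['\''] : List Char) ≤ ts ++ ['\''] := by
    cases ts with
    | nil => exact le_refl _
    | cons u us =>
      rw [List.cons_append, chConsLe]
      exact Or.inl (quote_lt_letter u (hl u (by simp)))
  have hts : (ts ++ ['\''] ≤ ['\'']) ↔ ts = [] := by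
    cases ts with
    | nil => simp
    | cons u us =>
      rw [List.cons_append, chConsLe]
      constructor
      · rintro (h | ⟨h, -⟩)
        · exact absurd h (not_lt_of_gt (quote_lt_letter u (hl u (by simp))))
        · exact absurd h.symm (ne_of_lt (quote_lt_letter u (hl u (by simp))))
      · rintro ⟨⟩
  constructor
  · rintro ⟨hlo, hhi⟩
    rw [List.cons_append, chConsLe] at hlo hhi
    constructor
    · rw [chConsLe]
      rcases hlo with h | ⟨-, hlo⟩
      · exact absurd h (lt_irrefl _)
      · rw [chConsLe] at hlo
        rcases hlo with h | ⟨h, -⟩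
        · exact Or.inl h
        · exact Or.inr ⟨h, chNilLe ts⟩
    · rw [chConsLe]
      rcases hhi with h | ⟨-, hhi⟩
      · exact absurd h (lt_irrefl _)
      · rw [chConsLe] at hhi
        rcases hhi with h | ⟨h, hhi⟩
        · exact Or.inl h
        · exact Or.inr ⟨h, (chLeNil ts).2 (hts.1 hhi)⟩
  · rintro ⟨hlo, hhi⟩
    rw [chConsLe] at hlo hhi
    constructor
    · rw [List.cons_append, chConsLe]
      refine Or.inr ⟨rfl, ?_⟩
      rw [chConsLe]
      rcases hlo with h | ⟨h, -⟩
      · exact Or.inl h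
      · exact Or.inr ⟨h, hqle⟩
    · rw [List.cons_append, chConsLe]
      refine Or.inr ⟨rfl, ?_⟩
      rw [chConsLe]
      rcases hhi with h | ⟨h, hh⟩
      · exact Or.inl h
      · exact Or.inr ⟨h, hts.2 ((chLeNil ts).1 hh)⟩

theorem cls_disjointU (c : Char) (hU : 'A' ≤ c ∧ c ≤ 'Z') :
    ¬ ('a' ≤ c ∧ c ≤ 'z') ∧ c ≠ ' ' := by
  refine ⟨fun hL => absurd (le_trans hL.1 hU.2) (by decide), fun h => ?_⟩
  subst h; exact absurd hU.1 (by decide)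

theorem cls_disjointL (c : Char) (hL : 'a' ≤ c ∧ c ≤ 'z') : c ≠ ' ' := by
  rintro rfl; exact absurd hL.1 (by decide)

theorem foldlA_flatMap (chars : List Char) (h : ∀ c ∈ chars, pvDomChar c = true) : ∀ np,
    chars.foldl (fun np character =>
      let np := if pyAscii ['A'] ≤ pyAscii [character] ∧ pyAscii [character] ≤ pyAscii ['Z']
        then np ++ [character] else np
      let np := if pyAscii ['a'] ≤ pyAscii [character] ∧ pyAscii [character] ≤ pyAscii ['z']
        then (np ++ [' ']) ++ [character] else np
      if character = ' ' then np ++ [character] else np) np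
      = np ++ chars.flatMap pvCls := by
  induction chars with
  | nil => intro np; simp
  | cons c r ih =>
    intro np
    rw [List.foldl_cons]
    simp only [ascii_up c, ascii_low c]
    by_cases hU : 'A' ≤ c ∧ c ≤ 'Z'
    · obtain ⟨hL, hS⟩ := cls_disjointU c hU
      simp only [if_pos hU, if_neg hL, if_neg hS]
      rw [ih (fun x hx => h x (List.mem_cons_of_mem _ hx)) (np ++ [c])]
      simp [pvCls, hU]
    · by_cases hL : 'a' ≤ c ∧ c ≤ 'z'
      · have hS := cls_disjointL c hL
        simp only [if_neg hU, if_pos hL, if_neg hS]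
        rw [ih (fun x hx => h x (List.mem_cons_of_mem _ hx)) ((np ++ [' ']) ++ [c])]
        simp [pvCls, hU, hL]
      · by_cases hS : c = ' '
        · simp only [if_neg hU, if_neg hL, if_pos hS]
          rw [ih (fun x hx => h x (List.mem_cons_of_mem _ hx)) (np ++ [c])]
          subst hS; simp [pvCls]
        · simp only [if_neg hU, if_neg hL, if_neg hS]
          rw [ih (fun x hx => h x (List.mem_cons_of_mem _ hx)) np]
          simp [pvCls, hU, hL, hS]

theorem foldlB_tokT (tv : Int) (chars : List Char) : ∀ out buf,
    (tpFlush tv (chars.foldl (fun (st : List String × List Char) ch =>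
      if 'A' ≤ ch ∧ ch ≤ 'Z' then (st.1, st.2 ++ [ch])
      else if 'a' ≤ ch ∧ ch ≤ 'z' then ((tpFlush tv st).1, [ch])
      else if ch = ' ' then tpFlush tv st
      else st) (out, buf))).1
      = out ++ (tokT buf chars).map (tpFlushTok tv) := by
  induction chars with
  | nil =>
    intro out buf
    by_cases hb : buf = [] <;> simp [tpFlush, tokT, hb]
  | cons c r ih =>
    intro out buf
    rw [List.foldl_cons]
    by_cases hU : 'A' ≤ c ∧ c ≤ 'Z'
    · simp only [if_pos hU]
      rw [ih out (buf ++ [c])]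
      simp [tokT, hU]
    · by_cases hL : 'a' ≤ c ∧ c ≤ 'z'
      · simp only [if_neg hU, if_pos hL]
        by_cases hb : buf = []
        · subst hb
          rw [show tpFlush tv (out, ([] : List Char)) = (out, []) by simp [tpFlush]]
          rw [ih out [c]]
          simp [tokT, hU, hL]
        · rw [show (tpFlush tv (out, buf)).1 = out ++ [tpFlushTok tv buf] by
            simp [tpFlush, hb]]
          rw [ih (out ++ [tpFlushTok tv buf]) [c]]
          simp [tokT, hU, hL, hb]
      · by_cases hS : c = ' '
        · simp only [if_neg hU, if_neg hL, if_pos hS]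
          by_cases hb : buf = []
          · subst hb
            rw [show tpFlush tv (out, ([] : List Char)) = (out, []) by simp [tpFlush]]
            rw [ih out []]
            simp [tokT, hS]
          · rw [show tpFlush tv (out, buf) = (out ++ [tpFlushTok tv buf], []) by
              simp [tpFlush, hb]]
            rw [ih (out ++ [tpFlushTok tv buf]) []]
            simp [tokT, hS, hb]
        · simp only [if_neg hU, if_neg hL, if_neg hS]
          rw [ih out buf]
          simp [tokT, hU, hL, hS]

theorem foldlA_map (tv : Int) (toks : List String) : ∀ acc,
    toks.foldl (fun transposed note =>
      if pyAscii ['A'] ≤ pyAscii note.toList ∧ pyAscii note.toList ≤ pyAscii ['Y']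
      then transposed ++ [transposition_note note tv]
      else transposed ++ [note]) acc
      = acc ++ toks.map (fun note =>
          if pyAscii ['A'] ≤ pyAscii note.toList ∧ pyAscii note.toList ≤ pyAscii ['Y']
          then transposition_note note tv else note) := by
  induction toks with
  | nil => intro acc; simp
  | cons n ns ih =>
    intro acc
    rw [List.foldl_cons, List.map_cons]
    by_cases hc : pyAscii ['A'] ≤ pyAscii n.toList ∧ pyAscii n.toList ≤ pyAscii ['Y']
    · rw [if_pos hc, if_pos hc, ih]
      simp
    · rw [if_neg hc, if_neg hc, ih]
      simp

-- ===== VERDICT (by name: the statement is the Claim_ definition above) =====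
theorem transposition_partition_spec : Claim_equal_transposition_partition := by
  intro partition tv hdom _hpre
  unfold Spec_transposition_partition
  have hchars : ∀ c ∈ partition.toList, pvDomChar c = true := by
    unfold Dom_transposition_partition at hdom
    rw [Bool.and_eq_true] at hdom
    have := hdom.1
    unfold pvDomStr at this
    rw [List.all_eq_true] at this
    intro c hc; exact this c hc
  -- A side
  have hA : transposition_partition partition tv
      = ((tokT [] partition.toList).map
          (fun t => if pyAscii ['A'] ≤ pyAscii (String.ofList t).toList ∧
                      pyAscii (String.ofList t).toList ≤ pyAscii ['Y']
                    then transposition_note (String.ofList t) tv else String.ofList t)) := by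
    unfold transposition_partition partition_to_list
    rw [foldlA_flatMap partition.toList hchars []]
    rw [show PySem.Chars.split₀ (([] : List Char) ++ partition.toList.flatMap pvCls)
          = PySem.Chars.split₀.go (partition.toList.flatMap pvCls) [] [] by
        simp [PySem.Chars.split₀]]
    rw [split₀_go_flatMap partition.toList [] []]
    rw [List.reverse_nil, List.nil_append]
    rw [foldlA_map tv _ []]
    rw [List.nil_append, List.map_map]
    rfl
  -- B side
  have hB : transposition_partition_alt partition tv
      = (tokT [] partition.toList).map (tpFlushTok tv) := by
    unfold transposition_partition_alt
    rw [foldlB_tokT tv partition.toList [] []]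
    rw [List.nil_append]
  rw [hA, hB]
  apply List.map_congr_left
  intro t ht
  obtain ⟨hne, hlet⟩ := tokT_letters partition.toList [] (by intro x hx; simp at hx) t ht
  have htl : (String.ofList t).toList = t := by simp
  rw [htl]
  by_cases h : ['A'] ≤ t ∧ t ≤ ['Y']
  · rw [if_pos ((ascii_tok t hne hlet).2 h)]
    unfold tpFlushTok transposition_note
    rw [if_pos h]
  · rw [if_neg (fun hc => h ((ascii_tok t hne hlet).1 hc))]
    unfold tpFlushTok
    rw [if_neg h]
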